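-- pv_equiv track=rewrite | github.com/everysoftware/algorithms-course | src/prefix_sums/blur_image.py | box_filter_ps
-- ===== SOURCE A (Python) =====
-- def box_filter_ps(image: list[list[int]], k: int = 1) -> list[list[int]]:
--     n, m = len(image), len(image[0])
--     prefix_sums = [[0] * (m + 1) for _ in range(n + 1)]
--     blurred_image = [[0] * m for _ in range(n)]
--     # Вычисление префиксных сумм
--     for i in range(n):
--         for j in range(m):
--             prefix_sums[i + 1][j + 1] = image[i][j] + prefix_sums[i][j + 1] + prefix_sums[i + 1][j] - prefix_sums[i][j]
--     # Размытие изображения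
--     for i in range(n):
--         for j in range(m):
--             # Координаты начала и конца прямоугольника
--             x1, y1 = max(0, i - k), max(0, j - k)
--             x2, y2 = min(n, i + k + 1), min(m, j + k + 1)
--             # Вычисление суммы и количества пикселей
--             total = prefix_sums[x2][y2] - prefix_sums[x1][y2] - prefix_sums[x2][y1] + prefix_sums[x1][y1]
--             count = (x2 - x1) * (y2 - y1)
--             blurred_image[i][j] = total // count
--     return blurred_image
-- ===== SOURCE B (Python) =====
-- def box_filter_ps(image: list[list[int]], k: int = 1) -> list[list[int]]:
--     n, m = len(image), len(image[0])
--     blurred_image = []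
--     for i in range(n):
--         row = []
--         for j in range(m):
--             x1, y1 = max(0, i - k), max(0, j - k)
--             x2, y2 = min(n, i + k + 1), min(m, j + k + 1)
--             total = 0
--             for a in range(x1, x2):
--                 for b in range(y1, y2):
--                     total += image[a][b]
--             row.append(total // ((x2 - x1) * (y2 - y1)))
--         blurred_image.append(row)
--     return blurred_image
-- ===== Notes on version B (the rewrite author's own statement) =====
-- stated objective: simpler
-- what changed: B drops the 2D prefix-sum table entirely and computes each output pixel by directly summing its clamped window with an inner double loop, then floor-dividing by the window area.
-- outside the precondition, e.g. on box_filter_ps([[5]], -1): A returns [[5]], B returns [[0]]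
import Mathlib
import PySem

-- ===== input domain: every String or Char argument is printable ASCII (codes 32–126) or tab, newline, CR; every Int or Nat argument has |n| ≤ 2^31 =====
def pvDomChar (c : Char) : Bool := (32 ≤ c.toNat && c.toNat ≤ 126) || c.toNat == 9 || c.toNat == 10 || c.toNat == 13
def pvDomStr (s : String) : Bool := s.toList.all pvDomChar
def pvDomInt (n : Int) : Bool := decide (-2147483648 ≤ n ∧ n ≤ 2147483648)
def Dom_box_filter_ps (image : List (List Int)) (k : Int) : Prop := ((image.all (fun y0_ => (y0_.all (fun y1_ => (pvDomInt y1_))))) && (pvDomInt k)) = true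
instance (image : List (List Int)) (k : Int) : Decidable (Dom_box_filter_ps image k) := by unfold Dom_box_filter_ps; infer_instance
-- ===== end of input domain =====

-- B replaces A's 2D prefix-sum table by a direct double-loop sum over each clamped window (simpler, not faster).


-- ===== PORT A =====
-- ps[x][y] in Python; the getD default is only reachable where Python raises IndexError (outside Pre_)
def pvG2 (ps : List (List Int)) (x y : Int) : Int :=
  PySem.List.pyGetD (PySem.List.pyGetD ps x []) y 0

def box_filter_ps (image : List (List Int)) (k : Int) : List (List Int) :=
  let n := image.length
  let m := (PySem.List.pyGetD image 0 []).length  -- len(image[0]); Python raises on [] (outside Pre_)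
  let init : List (List Int) := List.replicate (n+1) (List.replicate (m+1) 0)
  let ps := (List.range n).foldl (fun ps (i : Nat) =>
      (List.range m).foldl (fun ps (j : Nat) =>
        PySem.List.pySetD ps ((i:Int)+1)
          (PySem.List.pySetD (PySem.List.pyGetD ps ((i:Int)+1) []) ((j:Int)+1)
            (pvG2 image (i:Int) (j:Int) + pvG2 ps (i:Int) ((j:Int)+1)
              + pvG2 ps ((i:Int)+1) (j:Int) - pvG2 ps (i:Int) (j:Int)))) ps) init
  (List.range n).map (fun (i : Nat) => (List.range m).map (fun (j : Nat) =>
    let x1 : Int := max 0 ((i:Int) - k)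
    let y1 : Int := max 0 ((j:Int) - k)
    let x2 : Int := min (n:Int) ((i:Int) + k + 1)
    let y2 : Int := min (m:Int) ((j:Int) + k + 1)
    let total := pvG2 ps x2 y2 - pvG2 ps x1 y2 - pvG2 ps x2 y1 + pvG2 ps x1 y1
    let count := (x2 - x1) * (y2 - y1)
    PySem.Int.floordiv total count))

-- ===== PORT B =====
def box_filter_ps_alt (image : List (List Int)) (k : Int) : List (List Int) :=
  let n := image.length
  let m := (PySem.List.pyGetD image 0 []).length  -- len(image[0]); Python raises on [] (outside Pre_)
  (List.range n).map (fun (i : Nat) => (List.range m).map (fun (j : Nat) =>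
    let x1 : Int := max 0 ((i:Int) - k)
    let y1 : Int := max 0 ((j:Int) - k)
    let x2 : Int := min (n:Int) ((i:Int) + k + 1)
    let y2 : Int := min (m:Int) ((j:Int) + k + 1)
    let total := (PySem.List.pyRange x1 x2 1).foldl (fun acc a =>
      (PySem.List.pyRange y1 y2 1).foldl (fun acc b => acc + pvG2 image a b) acc) 0
    PySem.Int.floordiv total ((x2 - x1) * (y2 - y1))))

-- ===== PRECONDITION & SPEC =====
-- Pre_ excludes negative blur radius k — a meaningless input outside the task's natural domain, on which
-- A's inverted window bounds read the prefix table through Python negative-index wraparound and return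
-- accidental values (or raise IndexError) — and images that are empty or contain a row shorter than row 0,
-- on which A raises IndexError.
def Pre_box_filter_ps (image : List (List Int)) (k : Int) : Prop :=
  0 ≤ k ∧ image ≠ [] ∧ ∀ row ∈ image, (image.headD []).length ≤ row.length
instance (image : List (List Int)) (k : Int) : Decidable (Pre_box_filter_ps image k) := by
  unfold Pre_box_filter_ps; infer_instance

def pvWitness_box_filter_ps : List (List Int) × Int := ([[1, 2], [3, -4]], 1)

def Spec_box_filter_ps (image : List (List Int)) (k : Int) (out : List (List Int)) : Prop := out = box_filter_ps_alt image k
instance (image : List (List Int)) (k : Int) (out : List (List Int)) : Decidable (Spec_box_filter_ps image k out) := by unfold Spec_box_filter_ps; infer_instance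

-- ===== CLAIM (what is proved, stated in full; the proofs are below) =====
def Claim_equal_box_filter_ps : Prop := ∀ (image : List (List Int)) (k : Int), Dom_box_filter_ps image k → Pre_box_filter_ps image k → Spec_box_filter_ps image k (box_filter_ps image k)

-- ===== LEMMAS AND PROOFS =====

-- cell of a nested list with Nat indices (0 outside)
def pvCell (ps : List (List Int)) (x y : Nat) : Int := (ps.getD x []).getD y 0

-- prefix rectangle sum of the image
def pvR (image : List (List Int)) (x y : Nat) : Int :=
  ∑ a ∈ Finset.range x, ∑ b ∈ Finset.range y, pvCell image a b

-- the loop body of A's table-building inner loop, as the port writes it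
def pvBody (image : List (List Int)) (i : Nat) (ps : List (List Int)) (j : Nat) : List (List Int) :=
  PySem.List.pySetD ps ((i:Int)+1)
    (PySem.List.pySetD (PySem.List.pyGetD ps ((i:Int)+1) []) ((j:Int)+1)
      (pvG2 image (i:Int) (j:Int) + pvG2 ps (i:Int) ((j:Int)+1)
        + pvG2 ps ((i:Int)+1) (j:Int) - pvG2 ps (i:Int) (j:Int)))

lemma pvG2_nat (ps : List (List Int)) (x y : Nat) : pvG2 ps (x:Int) (y:Int) = pvCell ps x y := by
  simp [pvG2, pvCell]

lemma pvR_zero_right (image : List (List Int)) (x : Nat) : pvR image x 0 = 0 := by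
  simp [pvR]

lemma pvR_rec (image : List (List Int)) (t s : Nat) :
    pvR image (t+1) (s+1)
      = pvCell image t s + pvR image t (s+1) + pvR image (t+1) s - pvR image t s := by
  simp [pvR, Finset.sum_range_succ, Finset.sum_add_distrib]
  ring

-- table invariant: rows 1..t are final, row t+1 final up to column s, the rest still 0
def pvTab (image ps : List (List Int)) (n m t s : Nat) : Prop :=
  ps.length = n+1 ∧ (∀ r ∈ ps, r.length = m+1) ∧
  ∀ x y, x ≤ n → y ≤ m →
    pvCell ps x y = if x ≤ t ∨ (x = t+1 ∧ 1 ≤ y ∧ y ≤ s) then pvR image x y else 0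

lemma pvTab_init (image : List (List Int)) (n m : Nat) :
    pvTab image (List.replicate (n+1) (List.replicate (m+1) 0)) n m 0 0 := by
  refine ⟨by simp, by simp, ?_⟩
  intro x y hx hy
  have hc : pvCell (List.replicate (n+1) (List.replicate (m+1) (0:Int))) x y = 0 := by
    simp only [pvCell, List.getD_eq_getElem?_getD, List.getElem?_replicate]
    split_ifs <;> (simp [List.getElem?_replicate]; try (split_ifs <;> rfl))
  rw [hc]
  split_ifs with h
  · have hx0 : x = 0 := by omega
    subst hx0; simp [pvR]
  · rfl

lemma pvCell_set (ps : List (List Int)) (r : List Int) (x0 x y : Nat) (hx0 : x0 < ps.length) :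
    pvCell (ps.set x0 r) x y = if x = x0 then r.getD y 0 else pvCell ps x y := by
  by_cases h : x = x0
  · subst h
    rw [if_pos rfl]
    simp only [pvCell, List.getD_eq_getElem?_getD, List.getElem?_set_self hx0, Option.getD_some]
  · rw [if_neg h]
    simp only [pvCell, List.getD_eq_getElem?_getD, List.getElem?_set]
    rw [if_neg (fun he => h he.symm)]

lemma pvTab_step (image ps : List (List Int)) (n m t s : Nat)
    (h : pvTab image ps n m t s) (ht : t < n) (hs : s < m) :
    pvTab image (pvBody image t ps s) n m t (s+1) := by
  obtain ⟨hL, hRows, hC⟩ := h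
  have ht1 : (((t:Int))+1) = (((t+1 : Nat)):Int) := by push_cast; ring
  have hs1 : (((s:Int))+1) = (((s+1 : Nat)):Int) := by push_cast; ring
  have hbody : pvBody image t ps s
      = ps.set (t+1) ((ps.getD (t+1) []).set (s+1)
          (pvCell image t s + pvCell ps t (s+1) + pvCell ps (t+1) s - pvCell ps t s)) := by
    rw [pvBody, ht1, hs1, PySem.List.pyGetD_natCast]
    simp only [PySem.List.pySetD_natCast, pvG2_nat]
  have hxlt : t+1 < ps.length := by omega
  have hrowmem : ps.getD (t+1) [] ∈ ps := by
    rw [List.getD_eq_getElem?_getD, List.getElem?_eq_getElem hxlt]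
    exact List.getElem_mem hxlt
  have hrowlen : (ps.getD (t+1) []).length = m+1 := hRows _ hrowmem
  have hval : pvCell image t s + pvCell ps t (s+1) + pvCell ps (t+1) s - pvCell ps t s
      = pvR image (t+1) (s+1) := by
    have h1 : pvCell ps t (s+1) = pvR image t (s+1) := by
      rw [hC t (s+1) (by omega) (by omega)]; simp
    have h2 : pvCell ps (t+1) s = pvR image (t+1) s := by
      rw [hC (t+1) s (by omega) (by omega)]
      split_ifs with hcond
      · rfl
      · rcases Nat.eq_zero_or_pos s with hz | hp
        · subst hz; rw [pvR_zero_right]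
        · exfalso; omega
    have h3 : pvCell ps t s = pvR image t s := by
      rw [hC t s (by omega) (by omega)]; simp
    rw [h1, h2, h3, pvR_rec]
  rw [hbody]
  refine ⟨by simp [hL], ?_, ?_⟩
  · intro r hr
    rcases List.mem_or_eq_of_mem_set hr with hmem | heq
    · exact hRows _ hmem
    · rw [heq, List.length_set]; exact hrowlen
  · intro x y hx hy
    rw [pvCell_set _ _ _ _ _ hxlt]
    by_cases hxeq : x = t+1
    · rw [if_pos hxeq]
      subst hxeq
      have hget : ((ps.getD (t+1) []).set (s+1)
            (pvCell image t s + pvCell ps t (s+1) + pvCell ps (t+1) s - pvCell ps t s)).getD y 0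
          = if y = s+1 then (pvCell image t s + pvCell ps t (s+1) + pvCell ps (t+1) s - pvCell ps t s)
            else pvCell ps (t+1) y := by
        by_cases hy' : y = s+1
        · subst hy'
          rw [if_pos rfl, List.getD_eq_getElem?_getD, List.getElem?_set_self (by omega), Option.getD_some]
        · rw [if_neg hy']
          simp only [pvCell, List.getD_eq_getElem?_getD, List.getElem?_set]
          rw [if_neg (fun he => hy' he.symm)]
      rw [hget]
      by_cases hyeq : y = s+1
      · subst hyeq
        rw [if_pos rfl, hval, if_pos (Or.inr ⟨rfl, by omega, le_rfl⟩)]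
      · rw [if_neg hyeq, hC (t+1) y (by omega) hy]
        split_ifs with h1 h2 h2 <;> first | rfl | (exfalso; omega)
    · rw [if_neg hxeq, hC x y hx hy]
      split_ifs with h1 h2 h2 <;> first | rfl | (exfalso; omega)

lemma pvTab_next (image ps : List (List Int)) (n m t : Nat)
    (h : pvTab image ps n m t m) : pvTab image ps n m (t+1) 0 := by
  obtain ⟨hL, hRows, hC⟩ := h
  refine ⟨hL, hRows, ?_⟩
  intro x y hx hy
  rw [hC x y hx hy]
  split_ifs with h1 h2 h2
  · rfl
  · exfalso; omega
  · -- x = t+1, y = 0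
    have hx1 : x = t+1 := by omega
    have hy0 : y = 0 := by omega
    subst hx1; subst hy0
    rw [pvR_zero_right]
  · rfl

lemma pvInner_tab (image ps : List (List Int)) (n m t : Nat) (ht : t < n)
    (h : pvTab image ps n m t 0) :
    ∀ s, s ≤ m → pvTab image ((List.range s).foldl (pvBody image t) ps) n m t s := by
  intro s
  induction s with
  | zero => intro _; simpa using h
  | succ s ih =>
    intro hs
    rw [List.range_succ, List.foldl_append]
    exact pvTab_step _ _ _ _ _ _ (ih (by omega)) ht (by omega)

lemma pvOuter_tab (image : List (List Int)) (n m : Nat) :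
    ∀ t, t ≤ n →
      pvTab image ((List.range t).foldl (fun ps i => (List.range m).foldl (pvBody image i) ps)
        (List.replicate (n+1) (List.replicate (m+1) 0))) n m t 0 := by
  intro t
  induction t with
  | zero => intro _; simpa using pvTab_init image n m
  | succ t ih =>
    intro ht
    rw [List.range_succ, List.foldl_append]
    simp only [List.foldl_cons, List.foldl_nil]
    exact pvTab_next _ _ _ _ _ (pvInner_tab _ _ _ _ _ (by omega) (ih (by omega)) m le_rfl)

lemma pv_foldl_add (l : List Int) (f : Int → Int) (c : Int) :
    l.foldl (fun acc x => acc + f x) c = c + (l.map f).sum := by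
  induction l generalizing c with
  | nil => simp
  | cons x xs ih => simp [ih, add_assoc]

lemma pv_sum_pyRange (p q : Nat) (f : Int → Int) :
    ((PySem.List.pyRange (p:Int) (q:Int) 1).map f).sum = ∑ a ∈ Finset.Ico p q, f (a:Int) := by
  rw [PySem.List.pyRange_one]
  have h : ((q:Int) - (p:Int)).toNat = q - p := by omega
  rw [h, Finset.sum_Ico_eq_sum_range, List.map_map]
  induction (q - p) with
  | zero => simp
  | succ r ih =>
    rw [List.range_succ, Finset.sum_range_succ]
    simp only [List.map_append, List.sum_append]
    rw [ih]
    push_cast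
    simp

lemma pv_window (image : List (List Int)) (x1 x2 y1 y2 : Nat) (hx : x1 ≤ x2) (hy : y1 ≤ y2) :
    pvR image x2 y2 - pvR image x1 y2 - pvR image x2 y1 + pvR image x1 y1
      = ∑ a ∈ Finset.Ico x1 x2, ∑ b ∈ Finset.Ico y1 y2, pvCell image a b := by
  have hin : ∀ a, ∑ b ∈ Finset.Ico y1 y2, pvCell image a b
      = (∑ b ∈ Finset.range y2, pvCell image a b) - ∑ b ∈ Finset.range y1, pvCell image a b := by
    intro a; rw [Finset.sum_Ico_eq_sub _ hy]
  symm
  calc ∑ a ∈ Finset.Ico x1 x2, ∑ b ∈ Finset.Ico y1 y2, pvCell image a b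
      = ∑ a ∈ Finset.Ico x1 x2, ((∑ b ∈ Finset.range y2, pvCell image a b)
          - ∑ b ∈ Finset.range y1, pvCell image a b) := Finset.sum_congr rfl (fun a _ => hin a)
    _ = (∑ a ∈ Finset.Ico x1 x2, ∑ b ∈ Finset.range y2, pvCell image a b)
          - ∑ a ∈ Finset.Ico x1 x2, ∑ b ∈ Finset.range y1, pvCell image a b :=
        Finset.sum_sub_distrib _ _
    _ = pvR image x2 y2 - pvR image x1 y2 - pvR image x2 y1 + pvR image x1 y1 := by
        rw [Finset.sum_Ico_eq_sub _ hx, Finset.sum_Ico_eq_sub _ hx]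
        simp only [pvR]
        ring

lemma pv_total_alt (image : List (List Int)) (p q r w : Nat) :
    (PySem.List.pyRange (p:Int) (q:Int) 1).foldl (fun acc a =>
        (PySem.List.pyRange (r:Int) (w:Int) 1).foldl (fun acc b => acc + pvG2 image a b) acc) 0
      = ∑ a ∈ Finset.Ico p q, ∑ b ∈ Finset.Ico r w, pvCell image a b := by
  calc (PySem.List.pyRange (p:Int) (q:Int) 1).foldl (fun acc a =>
        (PySem.List.pyRange (r:Int) (w:Int) 1).foldl (fun acc b => acc + pvG2 image a b) acc) 0
      = (PySem.List.pyRange (p:Int) (q:Int) 1).foldl (fun acc a =>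
          acc + ((PySem.List.pyRange (r:Int) (w:Int) 1).map (pvG2 image a)).sum) 0 :=
        List.foldl_ext _ _ 0 (fun acc a _ => pv_foldl_add _ _ _)
    _ = 0 + ((PySem.List.pyRange (p:Int) (q:Int) 1).map (fun a =>
          ((PySem.List.pyRange (r:Int) (w:Int) 1).map (pvG2 image a)).sum)).sum :=
        pv_foldl_add _ _ _
    _ = ∑ a ∈ Finset.Ico p q, ∑ b ∈ Finset.Ico r w, pvCell image a b := by
        rw [zero_add, pv_sum_pyRange]
        refine Finset.sum_congr rfl (fun a _ => ?_)
        rw [pv_sum_pyRange]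
        exact Finset.sum_congr rfl (fun b _ => pvG2_nat image a b)

-- the per-pixel equality, with everything already in Nat-cast form
lemma pv_entry (image : List (List Int)) (n m : Nat) (k : Int) (hk : 0 ≤ k)
    (i j : Nat) (hi : i < n) (hj : j < m)
    (ps : List (List Int))
    (hcell : ∀ x y, x ≤ n → y ≤ m → pvCell ps x y = pvR image x y) :
    pvG2 ps (min (n:Int) ((i:Int) + k + 1)) (min (m:Int) ((j:Int) + k + 1))
      - pvG2 ps (max 0 ((i:Int) - k)) (min (m:Int) ((j:Int) + k + 1))
      - pvG2 ps (min (n:Int) ((i:Int) + k + 1)) (max 0 ((j:Int) - k))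
      + pvG2 ps (max 0 ((i:Int) - k)) (max 0 ((j:Int) - k))
    = (PySem.List.pyRange (max 0 ((i:Int) - k)) (min (n:Int) ((i:Int) + k + 1)) 1).foldl (fun acc a =>
        (PySem.List.pyRange (max 0 ((j:Int) - k)) (min (m:Int) ((j:Int) + k + 1)) 1).foldl
          (fun acc b => acc + pvG2 image a b) acc) 0 := by
  have hx1 : max 0 ((i:Int) - k) = (((i - k.toNat : Nat)):Int) := by omega
  have hy1 : max 0 ((j:Int) - k) = (((j - k.toNat : Nat)):Int) := by omega
  have hx2 : min (n:Int) ((i:Int) + k + 1) = (((min n (i + k.toNat + 1) : Nat)):Int) := by omega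
  have hy2 : min (m:Int) ((j:Int) + k + 1) = (((min m (j + k.toNat + 1) : Nat)):Int) := by omega
  rw [hx1, hy1, hx2, hy2, pv_total_alt]
  simp only [pvG2_nat]
  rw [hcell _ _ (by omega) (by omega), hcell _ _ (by omega) (by omega),
      hcell _ _ (by omega) (by omega), hcell _ _ (by omega) (by omega)]
  exact pv_window image _ _ _ _ (by omega) (by omega)

-- ===== VERDICT (by name: the statement is the Claim_ definition above) =====
theorem box_filter_ps_spec : Claim_equal_box_filter_ps := by
  intro image k _hdom hpre
  obtain ⟨hk, -, -⟩ := hpre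
  unfold Spec_box_filter_ps box_filter_ps box_filter_ps_alt
  dsimp only
  apply List.map_congr_left
  intro i hi
  apply List.map_congr_left
  intro j hj
  rw [List.mem_range] at hi hj
  congr 1
  have hfold : ((List.range image.length).foldl (fun ps (i : Nat) =>
        (List.range (PySem.List.pyGetD image 0 []).length).foldl (fun ps (j : Nat) =>
          PySem.List.pySetD ps ((i:Int)+1)
            (PySem.List.pySetD (PySem.List.pyGetD ps ((i:Int)+1) []) ((j:Int)+1)
              (pvG2 image (i:Int) (j:Int) + pvG2 ps (i:Int) ((j:Int)+1)
                + pvG2 ps ((i:Int)+1) (j:Int) - pvG2 ps (i:Int) (j:Int)))) ps)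
        (List.replicate (image.length+1)
          (List.replicate ((PySem.List.pyGetD image 0 []).length+1) 0)))
      = ((List.range image.length).foldl (fun ps i =>
          (List.range (PySem.List.pyGetD image 0 []).length).foldl (pvBody image i) ps)
        (List.replicate (image.length+1)
          (List.replicate ((PySem.List.pyGetD image 0 []).length+1) 0))) := rfl
  rw [hfold]
  have htab := pvOuter_tab image image.length (PySem.List.pyGetD image 0 []).length
    image.length le_rfl
  exact pv_entry image image.length (PySem.List.pyGetD image 0 []).length k hk i j hi hj _
    (fun x y hx hy => by rw [htab.2.2 x y hx hy, if_pos (Or.inl hx)])
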